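-- pv_equiv track=rewrite | github.com/ejaszewski/ruthless | util/board_cosnt_gen.py | up_left
-- ===== SOURCE A (Python) =====
-- def up_left(pos):
--     x = pos // 8
--     y = pos % 8
--     bs = ''
--     for i in range(0, 8):
--         for j in range(0, 8):
--             if x - i > 0 and (x - i == y - j):
--                 bs += '1'
--             else:
--                 bs += '0'
--         # bs += '\n'
--     return bs
-- ===== SOURCE B (Python) =====
-- def up_left(pos):
--     x = pos // 8
--     y = pos % 8
--     rows = []
--     for i in range(8):
--         j = y - x + i  # unique column solving x - i == y - j
--         if i < x and 0 <= j <= 7: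
--             rows.append('0' * j + '1' + '0' * (7 - j))
--         else:
--             rows.append('00000000')
--     return ''.join(rows)
-- ===== Notes on version B (the rewrite author's own statement) =====
-- stated objective: simpler
-- what changed: Replaces the 64-cell nested scan testing x-i==y-j per cell with a per-row closed form: each row has a single candidate column j=y-x+i, so B builds each 8-char row directly ('0'*j+'1'+'0'*(7-j) when i<x and 0<=j<=7, else all zeros) and joins the rows.
import Mathlib
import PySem

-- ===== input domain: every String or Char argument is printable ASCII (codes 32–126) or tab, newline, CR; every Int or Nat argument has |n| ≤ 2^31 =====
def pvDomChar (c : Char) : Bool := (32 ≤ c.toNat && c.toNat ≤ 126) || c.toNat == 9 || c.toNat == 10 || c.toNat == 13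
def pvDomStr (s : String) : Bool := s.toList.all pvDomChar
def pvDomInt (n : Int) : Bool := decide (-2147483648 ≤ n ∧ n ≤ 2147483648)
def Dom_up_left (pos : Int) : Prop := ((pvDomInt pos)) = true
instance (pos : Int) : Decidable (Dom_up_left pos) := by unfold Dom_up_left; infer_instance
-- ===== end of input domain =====

-- B replaces the 64-cell nested scan with a per-row closed form (the unique candidate
-- column j = y-x+i), building each 8-char row directly and joining the rows (simpler).

-- ===== PORT A =====
-- string accumulation is ported on List Char (String.ofList at return), exact for '+=' of chars
def up_left (pos : Int) : String :=
  let x := PySem.Int.floordiv pos 8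
  let y := PySem.Int.mod pos 8
  String.ofList ((PySem.List.pyRange 0 8 1).foldl (fun bs i =>
    (PySem.List.pyRange 0 8 1).foldl (fun bs j =>
      if x - i > 0 ∧ x - i = y - j then bs ++ ['1'] else bs ++ ['0']) bs) ([] : List Char))

-- ===== PORT B =====
-- one row of B: '0'*j + '1' + '0'*(7-j) when i < x and 0 <= j <= 7, else eight '0's
def upLeftRow (x y i : Int) : List Char :=
  let j := y - x + i
  if i < x ∧ 0 ≤ j ∧ j ≤ 7 then
    List.replicate j.toNat '0' ++ ['1'] ++ List.replicate (7 - j).toNat '0'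
  else
    ['0','0','0','0','0','0','0','0']

def up_left_alt (pos : Int) : String :=
  let x := PySem.Int.floordiv pos 8
  let y := PySem.Int.mod pos 8
  String.ofList (PySem.Chars.join [] ((PySem.List.pyRange 0 8 1).map (upLeftRow x y)))

-- ===== PRECONDITION & SPEC =====
def Spec_up_left (pos : Int) (out : String) : Prop := out = up_left_alt pos
instance (pos : Int) (out : String) : Decidable (Spec_up_left pos out) := by unfold Spec_up_left; infer_instance

-- ===== CLAIM (what is proved, stated in full; the proofs are below) =====
def Claim_equal_up_left : Prop := ∀ (pos : Int), Dom_up_left pos → Spec_up_left pos (up_left pos)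

-- ===== LEMMAS AND PROOFS =====

lemma pyRange_eight : PySem.List.pyRange 0 8 1 = [0, 1, 2, 3, 4, 5, 6, 7] := by decide

-- A's inner loop over one row appends exactly B's closed-form row
lemma row_eq (x y i : Int) (s : List Char) :
    ([0, 1, 2, 3, 4, 5, 6, 7] : List Int).foldl
      (fun bs j => if x - i > 0 ∧ x - i = y - j then bs ++ ['1'] else bs ++ ['0']) s
    = s ++ upLeftRow x y i := by
  have hc : ∀ j : Int, (x - i > 0 ∧ x - i = y - j) = (i < x ∧ j = y - x + i) :=
    fun j => propext (by omega)
  simp only [List.foldl, upLeftRow, hc]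
  by_cases h1 : i < x
  · simp only [h1, true_and]
    by_cases h2 : 0 ≤ y - x + i ∧ y - x + i ≤ 7
    · obtain ⟨h2, h3⟩ := h2
      set d := y - x + i with hd
      interval_cases d <;> norm_num [List.replicate] <;> decide
    · rw [if_neg (by omega), if_neg (by omega), if_neg (by omega), if_neg (by omega),
        if_neg (by omega), if_neg (by omega), if_neg (by omega), if_neg (by omega),
        if_neg (by omega)]
      simp
  · simp only [h1, false_and, if_false]
    simp

-- ===== VERDICT (by name: the statement is the Claim_ definition above) =====
theorem up_left_spec : Claim_equal_up_left := by
  intro pos _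
  show up_left pos = up_left_alt pos
  simp only [up_left, up_left_alt]
  rw [pyRange_eight]
  simp only [row_eq]
  rw [PySem.List.foldl_append_eq_flatMap]
  congr 1
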